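-- pv_equiv track=rewrite | github.com/bettyzry/BadLogit | attacker.py | count
-- ===== SOURCE A (Python) =====
-- def count(text):
--     count_z = 0
--     total_letters = 0
--     for char in text:
--         if char.isalpha():
--             total_letters += 1
--             if char.lower() == 'z':
--                 count_z += 1
--
--     return count_z, total_letters
-- ===== SOURCE B (Python) =====
-- def count(text):
--     freq = {}
--     for ch in text:
--         freq[ch] = freq.get(ch, 0) + 1
--     count_z = sum(v for k, v in freq.items() if k.lower() == 'z')
--     total_letters = sum(v for k, v in freq.items() if k.isalpha())
--     return count_z, total_letters
-- ===== Notes on version B (the rewrite author's own statement) =====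
-- stated objective: alternative
-- what changed: B replaces A's single character scan with two running counters by building a character-frequency dictionary first and then deriving both totals by summing multiplicities over the distinct characters.
import Mathlib
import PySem

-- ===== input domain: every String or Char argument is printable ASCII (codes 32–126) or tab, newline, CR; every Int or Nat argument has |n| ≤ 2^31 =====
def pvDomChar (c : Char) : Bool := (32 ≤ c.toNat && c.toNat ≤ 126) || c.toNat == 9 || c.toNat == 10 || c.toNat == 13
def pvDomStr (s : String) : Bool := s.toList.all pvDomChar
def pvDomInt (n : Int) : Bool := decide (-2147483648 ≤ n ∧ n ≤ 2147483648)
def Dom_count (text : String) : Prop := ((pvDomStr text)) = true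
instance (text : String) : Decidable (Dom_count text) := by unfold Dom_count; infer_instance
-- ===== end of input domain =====

-- B builds a character-frequency dictionary in one pass and then derives both totals by
-- summing multiplicities over the DISTINCT characters (alternative decomposition, not claimed faster).

-- ===== PORT A =====
-- single pass over the characters, two running counters, z counted only inside the alpha branch
def count (text : String) : Int × Int :=
  let r := text.toList.foldl
    (fun (st : Int × Int) char =>
      if PySem.Chars.isalpha char then
        let total_letters := st.2 + 1
        if PySem.Chars.lowerChar char == 'z' then (st.1 + 1, total_letters)
        else (st.1, total_letters)
      else st)
    ((0 : Int), (0 : Int))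
  (r.1, r.2)

-- ===== PORT B =====
-- freq[ch] = freq.get(ch, 0) + 1 over the text, then two sums over freq.items()
def count_alt (text : String) : Int × Int :=
  let freq : PySem.Dict Char Int :=
    text.toList.foldl (fun d ch => d.insert ch (d.getD ch 0 + 1)) PySem.Dict.empty
  let count_z : Int :=
    ((freq.items.filter (fun p => PySem.Chars.lowerChar p.1 == 'z')).map Prod.snd).sum
  let total_letters : Int :=
    ((freq.items.filter (fun p => PySem.Chars.isalpha p.1)).map Prod.snd).sum
  (count_z, total_letters)

-- ===== PRECONDITION & SPEC =====
def Spec_count (text : String) (out : Int × Int) : Prop := out = count_alt text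
instance (text : String) (out : Int × Int) : Decidable (Spec_count text out) := by unfold Spec_count; infer_instance

-- ===== CLAIM (what is proved, stated in full; the proofs are below) =====
def Claim_equal_count : Prop := ∀ (text : String), Dom_count text → Spec_count text (count text)

-- ===== LEMMAS AND PROOFS =====

-- any character whose Python .lower() is 'z' is a letter, so A's nested test equals B's flat test
theorem pred_z_alpha (c : Char) :
    (PySem.Chars.isalpha c && (PySem.Chars.lowerChar c == 'z')) = (PySem.Chars.lowerChar c == 'z') := by
  by_cases hu : PySem.Chars.isupper c = true
  · simp [PySem.Chars.isalpha, hu]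
  · have hl : PySem.Chars.lowerChar c = c := by
      simp [PySem.Chars.lowerChar, hu]
    rw [hl]
    by_cases hz : c = 'z'
    · subst hz; decide
    · simp [PySem.Chars.isalpha, hz]

-- A's loop computes the two countP's
theorem count_fold (l : List Char) (z t : Int) :
    l.foldl
      (fun (st : Int × Int) char =>
        if PySem.Chars.isalpha char then
          let total_letters := st.2 + 1
          if PySem.Chars.lowerChar char == 'z' then (st.1 + 1, total_letters)
          else (st.1, total_letters)
        else st)
      (z, t)
    = (z + (l.countP (fun c => PySem.Chars.isalpha c && (PySem.Chars.lowerChar c == 'z')) : Int),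
       t + (l.countP PySem.Chars.isalpha : Int)) := by
  induction l generalizing z t with
  | nil => simp
  | cons a l ih =>
    simp only [List.foldl_cons, List.countP_cons]
    by_cases ha : PySem.Chars.isalpha a = true
    · by_cases hz : (PySem.Chars.lowerChar a == 'z') = true
      · simp only [ha, hz, if_true]; rw [ih]
        simp [Prod.ext_iff]; constructor <;> ring
      · simp only [ha, hz, if_true]; rw [ih]
        simp [Prod.ext_iff]; ring
    · rw [if_neg (by simp [ha]), ih]
      simp [List.countP_cons, ha]

-- summing multiplicities of the distinct characters satisfying q counts the characters satisfying q
theorem counter_sum (l : List Char) (q : Char → Bool) :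
    (((PySem.Dict.counter l).items.filter (fun p : Char × Int => q p.1)).map Prod.snd).sum
      = (l.countP q : Int) := by
  rw [PySem.Dict.items_counter, List.filter_map, List.map_map]
  simp only [Function.comp_def]
  have hperm : List.Perm (PySem.Set.ofList l) l.dedup := by
    refine (List.perm_ext_iff_of_nodup (PySem.Set.nodup_ofList l) l.nodup_dedup).mpr ?_
    intro a
    rw [PySem.Set.mem_ofList, List.mem_dedup]
  have h2 : List.Perm
      (((PySem.Set.ofList l).filter (fun k => q k)).map (fun k => (l.count k : Int)))
      ((l.dedup.filter (fun k => q k)).map (fun k => (l.count k : Int))) :=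
    (hperm.filter _).map _
  rw [h2.sum_eq]
  have h3 : (l.dedup.filter (fun k => q k)).map (fun k => (l.count k : Int))
      = ((l.dedup.filter (fun k => q k)).map l.count).map (Nat.cast : ℕ → ℤ) := by
    rw [List.map_map]; rfl
  rw [h3, ← Nat.cast_list_sum, List.sum_map_count_dedup_filter_eq_countP]

-- ===== VERDICT (by name: the statement is the Claim_ definition above) =====
theorem count_spec : Claim_equal_count := by
  intro text _
  unfold Spec_count count count_alt
  rw [PySem.Dict.foldl_insert_getD_add_one_eq_counter]
  simp only [count_fold, zero_add]
  rw [counter_sum text.toList (fun c => PySem.Chars.lowerChar c == 'z'),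
      counter_sum text.toList PySem.Chars.isalpha]
  have hq : (fun c => PySem.Chars.isalpha c && (PySem.Chars.lowerChar c == 'z'))
      = (fun c => PySem.Chars.lowerChar c == 'z') := funext pred_z_alpha
  rw [hq]
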